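-- pv_equiv track=rewrite | github.com/ComputerScientist-01/Hackerrank-Solutions | Crossword Puzzle.py | fill_across
-- ===== SOURCE A (Python) =====
-- def fill_across(place_list, board):
--     where_to_start = place_list[len(place_list)-1]
--     x = where_to_start[0]
--     y = where_to_start[1]+1
--     while y<len(board[x]):
--         if board[x][y] != '+':
--             place_list.append([x,y])
--             y += 1
--         else:
--             y = len(board[x])
--     return place_list
-- ===== SOURCE B (Python) =====
-- def fill_across(place_list, board):
--     x = place_list[-1][0]
--     y = place_list[-1][1] + 1
--     seg = board[x][y:].partition('+')[0]
--     place_list += [[x, y + k] for k in range(len(seg))]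
--     return place_list
-- ===== Notes on version B (the rewrite author's own statement) =====
-- stated objective: simpler
-- what changed: B replaces A's stateful index-scanning while loop (append one cell per iteration, exit via a sentinel assignment y = len(board[x])) by a loop-free string computation: slice the row at the start position, take the text before the first '+' with str.partition, and extend place_list with one comprehension over its length.
-- intended difference: When the start index y = place_list[-1][1]+1 is negative (within range) and the row suffix it names contains no '+' and the row does not start with '+', A's negative indexing silently wraps past the row end and keeps appending cells from column 0 onward, while B stops at the end of the row; stopping at the row boundary is the intended crossword behaviour, the wraparound is an indexing artefact. — e.g. on fill_across([[0, -3]], ["ab"]): A returns [[0, -3], [0, -2], [0, -1], [0, 0], [0, 1]], B returns [[0, -3], [0, -2], [0, -1]]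
import Mathlib
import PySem

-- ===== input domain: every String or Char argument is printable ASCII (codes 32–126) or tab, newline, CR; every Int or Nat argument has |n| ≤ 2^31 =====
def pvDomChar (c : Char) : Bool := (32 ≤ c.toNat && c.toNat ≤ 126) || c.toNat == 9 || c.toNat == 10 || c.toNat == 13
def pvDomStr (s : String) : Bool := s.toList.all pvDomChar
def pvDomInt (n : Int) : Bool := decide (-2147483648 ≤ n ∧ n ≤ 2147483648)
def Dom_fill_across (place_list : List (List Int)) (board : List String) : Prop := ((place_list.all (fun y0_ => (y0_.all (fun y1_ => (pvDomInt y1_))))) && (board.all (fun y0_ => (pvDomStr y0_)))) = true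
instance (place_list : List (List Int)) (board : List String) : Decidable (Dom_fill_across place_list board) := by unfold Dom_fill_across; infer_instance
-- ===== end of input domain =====

-- B replaces A's stateful scanning while loop by a loop-free slice + partition('+') +
-- bulk comprehension (objective: simpler); both mutate place_list in place (append/extend),
-- the theorems are about the return value.

-- ===== PORT A =====
-- A's while loop: y scans board[x]; on '+' the loop exits by setting y = len(board[x]),
-- whose re-test then fails.  The fuel argument is only a totality guard: fill_across
-- passes enough for every iteration the Python loop performs.
def fillLoopA (x : Int) (r : List Char) : Nat → List (List Int) → Int → List (List Int)
  | 0, acc, _ => acc   -- fuel exhausted: never reached with the fuel fill_across supplies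
  | Nat.succ n, acc, y =>
    if y < (r.length : Int) then
      match PySem.List.pyGet? r y with
      | none => acc   -- board[x][y] raises IndexError: unreachable under Pre_
      | some c =>
        if c ≠ '+' then fillLoopA x r n (acc ++ [[x, y]]) (y + 1)
        else fillLoopA x r n acc (r.length : Int)
    else acc

def fill_across (place_list : List (List Int)) (board : List String) : List (List Int) :=
  match PySem.List.pyGet? place_list ((place_list.length : Int) - 1) with
  | none => place_list   -- place_list[len-1] raises IndexError: unreachable under Pre_
  | some w =>
    match PySem.List.pyGet? w 0, PySem.List.pyGet? w 1 with
    | some x, some y0 =>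
      match PySem.List.pyGet? board x with
      | some row => fillLoopA x row.toList (2 * row.toList.length + 2) place_list (y0 + 1)
      | none => place_list   -- board[x] raises: unreachable under Pre_
    | _, _ => place_list     -- where_to_start[0]/[1] raises: unreachable under Pre_

-- ===== PORT B =====
-- exact hand port of str.partition(sep)[0] for a single-character separator:
-- the text strictly before the first occurrence of sep (the whole string if absent)
def partFst (sep : Char) : List Char → List Char
  | [] => []
  | c :: cs => if c = sep then [] else c :: partFst sep cs

def fill_across_alt (place_list : List (List Int)) (board : List String) : List (List Int) :=
  match PySem.List.pyGet? place_list (-1) with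
  | none => place_list
  | some last =>
    match PySem.List.pyGet? last 0 with
    | none => place_list
    | some x =>
      match PySem.List.pyGet? last 1 with
      | none => place_list
      | some y1 =>
        let y := y1 + 1
        match PySem.List.pyGet? board x with
        | none => place_list
        | some row =>
          -- seg = board[x][y:].partition('+')[0]
          let seg := partFst '+' (PySem.List.slice row.toList (some y) none)
          -- place_list += [[x, y + k] for k in range(len(seg))]
          place_list ++ (PySem.List.pyRange 0 (seg.length : Int) 1).map (fun k => [x, y + k])

-- ===== PRECONDITION & SPEC =====
-- Pre_ excludes exactly the inputs where the Python A raises: empty place_list /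
-- a last entry shorter than 2 (IndexError on where_to_start[0]/[1]), x outside
-- board's (negative-wrapping) index range, or a start index y below -len(board[x])
-- (IndexError on board[x][y]).  A returns on every other input.
def Pre_fill_across (place_list : List (List Int)) (board : List String) : Prop :=
  place_list ≠ [] ∧
  2 ≤ (place_list.getLastD []).length ∧
  (-(board.length : Int) ≤ (place_list.getLastD []).getD 0 0 ∧
    (place_list.getLastD []).getD 0 0 < (board.length : Int)) ∧
  -(((PySem.List.pyGetD board ((place_list.getLastD []).getD 0 0) "").toList.length : Int))
    ≤ (place_list.getLastD []).getD 1 0 + 1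
instance (place_list : List (List Int)) (board : List String) : Decidable (Pre_fill_across place_list board) := by unfold Pre_fill_across; infer_instance

def pvWitness_fill_across : List (List Int) × List String := ([[0, 0]], ["ab+c"])

-- On a negative in-range start index whose row suffix contains no '+' and whose row does
-- not start with '+', A's negative indexing wraps past the row end and keeps appending cells
-- from column 0 on, while B stops at the row end — the intended crossword behaviour.
def D_fill_across (place_list : List (List Int)) (board : List String) : Prop :=
  let r := (PySem.List.pyGetD board ((place_list.getLastD []).getD 0 0) "").toList
  let y := (place_list.getLastD []).getD 1 0 + 1
  y < 0 ∧ -(r.length : Int) ≤ y ∧ '+' ∉ r.drop ((r.length : Int) + y).toNat ∧ r.getD 0 '+' ≠ '+'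
instance (place_list : List (List Int)) (board : List String) : Decidable (D_fill_across place_list board) := by unfold D_fill_across; infer_instance

def Spec_fill_across (place_list : List (List Int)) (board : List String) (out : List (List Int)) : Prop := ¬ D_fill_across place_list board → out = fill_across_alt place_list board
instance (place_list : List (List Int)) (board : List String) (out : List (List Int)) : Decidable (Spec_fill_across place_list board out) := by unfold Spec_fill_across; infer_instance

def pvDiffWitness_fill_across : List (List Int) × List String := ([[0, -3]], ["ab"])
def pvDiffWitnessOut_fill_across : (List (List Int)) × (List (List Int)) :=
  ([[0, -3], [0, -2], [0, -1], [0, 0], [0, 1]], [[0, -3], [0, -2], [0, -1]])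

-- ===== CLAIM (what is proved, stated in full; the proofs are below) =====
def Claim_unchanged_fill_across : Prop := ∀ (place_list : List (List Int)) (board : List String), Dom_fill_across place_list board → Pre_fill_across place_list board → Spec_fill_across place_list board (fill_across place_list board)
def Claim_changed_fill_across : Prop := Dom_fill_across (pvDiffWitness_fill_across.1) (pvDiffWitness_fill_across.2) ∧ Pre_fill_across (pvDiffWitness_fill_across.1) (pvDiffWitness_fill_across.2) ∧ D_fill_across (pvDiffWitness_fill_across.1) (pvDiffWitness_fill_across.2) ∧ fill_across (pvDiffWitness_fill_across.1) (pvDiffWitness_fill_across.2) = pvDiffWitnessOut_fill_across.1 ∧ fill_across_alt (pvDiffWitness_fill_across.1) (pvDiffWitness_fill_across.2) = pvDiffWitnessOut_fill_across.2 ∧ pvDiffWitnessOut_fill_across.1 ≠ pvDiffWitnessOut_fill_across.2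
def Claim_exact_fill_across : Prop := ∀ (place_list : List (List Int)) (board : List String), Dom_fill_across place_list board → Pre_fill_across place_list board → D_fill_across place_list board → fill_across place_list board ≠ fill_across_alt place_list board

-- ===== LEMMAS AND PROOFS =====

-- the (clamped, wrap-resolved) absolute start position of the slice
def absIdx (len : Nat) (y : Int) : Nat := (if y < 0 then (len : Int) + y else y).toNat

-- length of B's segment, as a function of the row and the (relative) start index
def segB (r : List Char) (y : Int) : Nat := (partFst '+' (PySem.List.slice r (some y) none)).length

-- the invariant under which A's wrap-scan and B's suffix-scan agree
def InvScan (r : List Char) (y : Int) : Prop :=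
  0 ≤ y ∨ '+' ∈ r.drop (absIdx r.length y) ∨ r.getD 0 '+' = '+'

theorem slice_eq_drop_absIdx (r : List Char) (y : Int) (h : -(r.length : Int) ≤ y) :
    PySem.List.slice r (some y) none = r.drop (absIdx r.length y) := by
  rw [PySem.List.slice_some_none]
  unfold PySem.List.clampIdx absIdx
  by_cases h1 : y < 0
  · rw [if_pos h1, if_pos h1, if_neg (by omega)]
  · rw [if_neg h1, if_neg h1]
    by_cases h2 : y.toNat ≤ r.length
    · rw [min_eq_left h2]
    · rw [min_eq_right (by omega), List.drop_length]
      exact (List.drop_eq_nil_iff.mpr (by omega)).symm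

theorem pyGet?_eq_absIdx (r : List Char) (y : Int) (h1 : -(r.length : Int) ≤ y)
    (h2 : y < (r.length : Int)) :
    PySem.List.pyGet? r y = r[absIdx r.length y]? := by
  simp only [PySem.List.pyGet?, PySem.List.pyIdx?, absIdx]
  by_cases hneg : y < 0
  · rw [if_neg (by omega), if_pos (by omega), if_pos hneg]
    simp only [Option.bind_some]
    congr 1
    omega
  · rw [if_pos (by omega), if_pos (by omega), if_neg hneg]
    simp

theorem absIdx_lt (len : Nat) (y : Int) (h1 : -(len : Int) ≤ y) (h2 : y < (len : Int)) :
    absIdx len y < len := by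
  unfold absIdx; split_ifs <;> omega

theorem fillLoopA_len (x : Int) (r : List Char) :
    ∀ (fuel : Nat) (acc : List (List Int)), fillLoopA x r fuel acc (r.length : Int) = acc := by
  intro fuel acc
  cases fuel with
  | zero => rfl
  | succ n => rw [fillLoopA, if_neg (by omega)]

theorem loopB_eq (x : Int) (r : List Char) :
    ∀ (fuel : Nat) (y : Int) (acc : List (List Int)),
      ((r.length : Int) - y).toNat < fuel → -(r.length : Int) ≤ y → InvScan r y →
      fillLoopA x r fuel acc y = acc ++ (List.range (segB r y)).map (fun (k : Nat) => [x, y + (k : Int)]) := by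
  intro fuel
  induction fuel with
  | zero => intro y acc hn; omega
  | succ n ih =>
    intro y acc hn hy hinv
    by_cases hlt : y < (r.length : Int)
    case neg =>
      have hseg : segB r y = 0 := by
        unfold segB
        rw [slice_eq_drop_absIdx r y hy,
          List.drop_eq_nil_iff.mpr (by unfold absIdx; split_ifs <;> omega)]
        rfl
      rw [fillLoopA, if_neg hlt, hseg]
      simp
    case pos =>
    have hidx := absIdx_lt r.length y hy hlt
    have hget : PySem.List.pyGet? r y = some (r[absIdx r.length y]) := by
      rw [pyGet?_eq_absIdx r y hy hlt, List.getElem?_eq_getElem hidx]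
    have hdrop : r.drop (absIdx r.length y) = r[absIdx r.length y] :: r.drop (absIdx r.length y + 1) :=
      (List.getElem_cons_drop hidx).symm
    have hslice := slice_eq_drop_absIdx r y hy
    set c := r[absIdx r.length y] with hc
    rw [fillLoopA, if_pos hlt, hget]
    show (if c ≠ '+' then fillLoopA x r n (acc ++ [[x, y]]) (y + 1)
          else fillLoopA x r n acc (r.length : Int))
        = acc ++ (List.range (segB r y)).map (fun (k : Nat) => [x, y + (k : Int)])
    by_cases hplus : c = '+'
    · rw [if_neg (by simp [hplus]), fillLoopA_len]
      have hseg : segB r y = 0 := by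
        unfold segB
        rw [hslice, hdrop, partFst, if_pos hplus]
        rfl
      rw [hseg]; simp
    · rw [if_pos hplus]
      have hsegstep : segB r y = segB r (y + 1) + 1 := by
        unfold segB
        rw [hslice, hdrop, partFst, if_neg hplus, slice_eq_drop_absIdx r (y + 1) (by omega)]
        by_cases hcr : y + 1 = 0 ∧ y < 0
        · -- crossing the row end: the invariant forces row[0] = '+', so both segments stop here
          obtain ⟨h0, hneg⟩ := hcr
          have habs1 : absIdx r.length y + 1 = r.length := by unfold absIdx; split_ifs <;> omega
          have habs0 : absIdx r.length (y + 1) = 0 := by unfold absIdx; split_ifs <;> omega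
          rcases hinv with h | h | h
          · omega
          · rw [hdrop] at h
            rcases List.mem_cons.mp h with h | h
            · exact absurd h.symm hplus
            · rw [habs1, List.drop_length] at h
              simp at h
          · rw [habs1, habs0, List.drop_length, List.drop_zero]
            cases r with
            | nil => rfl
            | cons a t =>
              simp only [List.getD_cons_zero] at h
              simp [partFst, h]
        · have habs1 : absIdx r.length (y + 1) = absIdx r.length y + 1 := by
            unfold absIdx; split_ifs <;> omega
          rw [habs1]
          simp
      have hinv1 : InvScan r (y + 1) := by
        by_cases h : 0 ≤ y + 1
        · exact Or.inl h
        · rcases hinv with h' | h' | h'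
          · omega
          · rw [hdrop] at h'
            rcases List.mem_cons.mp h' with h'' | h''
            · exact absurd h''.symm hplus
            · refine Or.inr (Or.inl ?_)
              have habs1 : absIdx r.length (y + 1) = absIdx r.length y + 1 := by
                unfold absIdx; split_ifs <;> omega
              rw [habs1]; exact h''
          · exact Or.inr (Or.inr h')
      rw [ih (y + 1) (acc ++ [[x, y]]) (by omega) (by omega) hinv1, hsegstep,
        List.range_succ_eq_map, List.map_cons, List.map_map]
      simp only [List.append_assoc, List.cons_append, List.nil_append]
      congr 2
      · simp
      · apply List.map_congr_left
        intro k _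
        simp only [Function.comp_apply]
        push_cast
        ring_nf

theorem partFst_of_not_mem (sep : Char) : ∀ (l : List Char), sep ∉ l → partFst sep l = l := by
  intro l
  induction l with
  | nil => intro _; rfl
  | cons c cs ih =>
    intro h
    simp only [List.mem_cons, not_or] at h
    rw [partFst, if_neg (fun e => h.1 e.symm), ih h.2]

theorem lenMono (x : Int) (r : List Char) :
    ∀ (fuel : Nat) (acc : List (List Int)) (y : Int),
      acc.length ≤ (fillLoopA x r fuel acc y).length := by
  intro fuel
  induction fuel with
  | zero => intro acc y; simp [fillLoopA]
  | succ n ih =>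
    intro acc y
    rw [fillLoopA]
    by_cases hlt : y < (r.length : Int)
    · rw [if_pos hlt]
      cases hget : PySem.List.pyGet? r y with
      | none => exact le_refl _
      | some c =>
        show acc.length ≤ (if c ≠ '+' then fillLoopA x r n (acc ++ [[x, y]]) (y + 1)
          else fillLoopA x r n acc (r.length : Int)).length
        by_cases hc : c = '+'
        · rw [if_neg (by simp [hc])]
          exact ih acc _
        · rw [if_pos hc]
          calc acc.length ≤ (acc ++ [[x, y]]).length := by simp
            _ ≤ _ := ih _ _
    · rw [if_neg hlt]

theorem lenA (x : Int) (r : List Char) :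
    ∀ (fuel : Nat) (y : Int) (acc : List (List Int)),
      ((r.length : Int) - y).toNat < fuel → -(r.length : Int) ≤ y → y < 0 →
      '+' ∉ r.drop (absIdx r.length y) → r.getD 0 '+' ≠ '+' →
      acc.length + (-y).toNat + 1 ≤ (fillLoopA x r fuel acc y).length := by
  intro fuel
  induction fuel with
  | zero => intro y acc hn; omega
  | succ n ih =>
    intro y acc hn hy hneg hnm h0
    have hlen : 0 < r.length := by omega
    have hlt : y < (r.length : Int) := by omega
    have hidx := absIdx_lt r.length y hy hlt
    have hget : PySem.List.pyGet? r y = some (r[absIdx r.length y]) := by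
      rw [pyGet?_eq_absIdx r y hy hlt, List.getElem?_eq_getElem hidx]
    have hdrop : r.drop (absIdx r.length y) = r[absIdx r.length y] :: r.drop (absIdx r.length y + 1) :=
      (List.getElem_cons_drop hidx).symm
    rw [hdrop] at hnm
    simp only [List.mem_cons, not_or] at hnm
    obtain ⟨hne1, hnm'⟩ := hnm
    rw [fillLoopA, if_pos hlt, hget]
    show acc.length + (-y).toNat + 1 ≤ (if r[absIdx r.length y] ≠ '+' then
      fillLoopA x r n (acc ++ [[x, y]]) (y + 1) else fillLoopA x r n acc (r.length : Int)).length
    rw [if_pos (Ne.symm hne1)]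
    have hacc : (acc ++ [[x, y]]).length = acc.length + 1 := by simp
    by_cases hy1 : y + 1 < 0
    · have habs1 : absIdx r.length (y + 1) = absIdx r.length y + 1 := by
        unfold absIdx; split_ifs <;> omega
      have hrec := ih (y + 1) (acc ++ [[x, y]]) (by omega) (by omega) hy1 (by rw [habs1]; exact hnm') h0
      omega
    · have hy0 : y = -1 := by omega
      subst hy0
      rcases n with _ | m
      · omega
      · obtain ⟨a, t, hrt⟩ : ∃ a t, r = a :: t := by
          cases r with
          | nil => simp at hlen
          | cons a t => exact ⟨a, t, rfl⟩
        have hget0 : PySem.List.pyGet? r (-1 + 1) = some a := by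
          rw [hrt, show (-1 + 1 : Int) = ((0 : Nat) : Int) by rfl, PySem.List.pyGet?_natCast]
          rfl
        have ha : a ≠ '+' := by
          rw [hrt] at h0
          simpa using h0
        rw [fillLoopA, if_pos (by omega), hget0]
        show acc.length + (-(-1 : Int)).toNat + 1 ≤ (if a ≠ '+' then
          fillLoopA x r m ((acc ++ [[x, -1]]) ++ [[x, -1 + 1]]) (-1 + 1 + 1)
          else fillLoopA x r m (acc ++ [[x, -1]]) (r.length : Int)).length
        rw [if_pos ha]
        have := lenMono x r m ((acc ++ [[x, -1]]) ++ [[x, -1 + 1]]) (-1 + 1 + 1)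
        have hacc2 : ((acc ++ [[x, -1]]) ++ [[x, -1 + 1]]).length = acc.length + 2 := by simp
        omega

-- ===== VERDICT (by name: the statement is the Claim_ definition above) =====
theorem fill_across_spec : Claim_unchanged_fill_across := by
  intro place_list board _hdom hpre hnd
  obtain ⟨hne, hlen2, ⟨hx0, hx1⟩, hy⟩ := hpre
  set w := place_list.getLastD [] with hw
  have hlast : place_list.getLast? = some w := by
    cases place_list with
    | nil => exact absurd rfl hne
    | cons a l => simp [hw, List.getLastD_eq_getLast?, List.getLast?_cons]
  have hgetA : PySem.List.pyGet? place_list ((place_list.length : Int) - 1) = some w := by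
    have hpos : 0 < place_list.length := List.length_pos_iff.mpr hne
    have hcast : ((place_list.length : Int) - 1) = ((place_list.length - 1 : Nat) : Int) := by omega
    rw [hcast, PySem.List.pyGet?_natCast]
    rw [List.getLast?_eq_getElem?] at hlast
    exact hlast
  have hgetB : PySem.List.pyGet? place_list (-1) = some w := by
    rw [PySem.List.pyGet?_neg_one, hlast]
  have h0 : PySem.List.pyGet? w 0 = some (w.getD 0 0) := by
    rw [PySem.List.pyGet?_zero, List.getD_eq_getElem?_getD,
      List.getElem?_eq_getElem (by omega)]
    rfl
  have h1 : PySem.List.pyGet? w 1 = some (w.getD 1 0) := by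
    rw [show (1 : Int) = ((1 : Nat) : Int) by rfl, PySem.List.pyGet?_natCast,
      List.getD_eq_getElem?_getD, List.getElem?_eq_getElem (by omega)]
    rfl
  set x := w.getD 0 0 with hxdef
  have hrow : PySem.List.pyGet? board x ≠ none := by
    intro hnone
    rw [PySem.List.pyGet?_eq_none_iff] at hnone
    exact hnone (by simp [PySem.Raise.InRange]; omega)
  rcases Option.ne_none_iff_exists'.mp hrow with ⟨row, hrowe⟩
  have hrowD : PySem.List.pyGetD board x "" = row := by
    have hdef : PySem.List.pyGetD board x "" = (PySem.List.pyGet? board x).getD "" := by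
      simp [PySem.List.pyGetD, PySem.List.pyGet?]
    rw [hdef, hrowe, Option.getD_some]
  rw [hrowD] at hy
  simp only [fill_across, fill_across_alt, hgetA, hgetB, h0, h1, hrowe]
  set r := row.toList with hr
  set y := w.getD 1 0 + 1 with hydef
  have hinv : InvScan r y := by
    by_cases hy0 : 0 ≤ y
    · exact Or.inl hy0
    · unfold D_fill_across at hnd
      simp only [] at hnd
      rw [hrowD, ← hw, ← hr, ← hydef] at hnd
      push Not at hnd
      right
      by_cases hmem : '+' ∈ r.drop (absIdx r.length y)
      · exact Or.inl hmem
      · refine Or.inr ?_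
        have h2 := hnd (by omega) hy
        have h3 : '+' ∉ List.drop (((r.length : Int) + y).toNat) r := by
          rw [show (((r.length : Int)) + y).toNat = absIdx r.length y from by
            unfold absIdx; split_ifs <;> omega]
          exact hmem
        exact h2 h3
  rw [loopB_eq x r (2 * r.length + 2) y place_list (by omega) (by omega) hinv]
  congr 1
  rw [PySem.List.pyRange_zero_natCast, List.map_map]
  rfl

theorem fill_across_changed : Claim_changed_fill_across := by
  unfold Claim_changed_fill_across; decide

theorem fill_across_tight : Claim_exact_fill_across := by
  intro place_list board _hdom hpre hd
  obtain ⟨hne, hlen2, ⟨hx0, hx1⟩, hy⟩ := hpre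
  set w := place_list.getLastD [] with hw
  have hlast : place_list.getLast? = some w := by
    cases place_list with
    | nil => exact absurd rfl hne
    | cons a l => simp [hw, List.getLastD_eq_getLast?, List.getLast?_cons]
  have hgetA : PySem.List.pyGet? place_list ((place_list.length : Int) - 1) = some w := by
    have hpos : 0 < place_list.length := List.length_pos_iff.mpr hne
    have hcast : ((place_list.length : Int) - 1) = ((place_list.length - 1 : Nat) : Int) := by omega
    rw [hcast, PySem.List.pyGet?_natCast]
    rw [List.getLast?_eq_getElem?] at hlast
    exact hlast
  have hgetB : PySem.List.pyGet? place_list (-1) = some w := by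
    rw [PySem.List.pyGet?_neg_one, hlast]
  have h0 : PySem.List.pyGet? w 0 = some (w.getD 0 0) := by
    rw [PySem.List.pyGet?_zero, List.getD_eq_getElem?_getD,
      List.getElem?_eq_getElem (by omega)]
    rfl
  have h1 : PySem.List.pyGet? w 1 = some (w.getD 1 0) := by
    rw [show (1 : Int) = ((1 : Nat) : Int) by rfl, PySem.List.pyGet?_natCast,
      List.getD_eq_getElem?_getD, List.getElem?_eq_getElem (by omega)]
    rfl
  set x := w.getD 0 0 with hxdef
  have hrow : PySem.List.pyGet? board x ≠ none := by
    intro hnone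
    rw [PySem.List.pyGet?_eq_none_iff] at hnone
    exact hnone (by simp [PySem.Raise.InRange]; omega)
  rcases Option.ne_none_iff_exists'.mp hrow with ⟨row, hrowe⟩
  have hrowD : PySem.List.pyGetD board x "" = row := by
    have hdef : PySem.List.pyGetD board x "" = (PySem.List.pyGet? board x).getD "" := by
      simp [PySem.List.pyGetD, PySem.List.pyGet?]
    rw [hdef, hrowe, Option.getD_some]
  rw [hrowD] at hy
  set r := row.toList with hr
  set y := w.getD 1 0 + 1 with hydef
  unfold D_fill_across at hd
  rw [hrowD, ← hw, ← hr, ← hydef] at hd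
  obtain ⟨hneg, _, hnm, hd0⟩ := hd
  have hnm' : '+' ∉ r.drop (absIdx r.length y) := by
    rw [show absIdx r.length y = ((r.length : Int) + y).toNat from by
      unfold absIdx; split_ifs <;> omega]
    exact hnm
  have hA : fill_across place_list board = fillLoopA x r (2 * r.length + 2) place_list y := by
    simp only [fill_across, hgetA, h0, h1, hrowe]
    rw [hr, hydef]
  have hAlen := lenA x r (2 * r.length + 2) y place_list (by omega) hy hneg hnm' hd0
  have hBlen : (fill_across_alt place_list board).length = place_list.length + (-y).toNat := by
    simp only [fill_across_alt, hgetB, h0, h1, hrowe]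
    rw [PySem.List.pyRange_zero_natCast]
    simp only [List.length_append, List.length_map, List.length_range]
    congr 1
    rw [← hr, ← hydef, slice_eq_drop_absIdx r y hy, partFst_of_not_mem '+' _ hnm', List.length_drop]
    unfold absIdx
    split_ifs <;> omega
  intro heq
  have h' := congrArg List.length heq
  rw [hA] at h'
  omega
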